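-- pv_equiv track=rewrite | github.com/marians002/IA-Sim-MLB-Prediction | manager/schedule.py | determine_postseason_teams
-- ===== SOURCE A (Python) =====
-- def determine_postseason_teams(divisions, standings):
--     # Determine division winners
--     division_winners = []
--     wild_cards = []
--
--     for division in divisions:
--         division_standings = sorted(division, key=lambda x: standings[x], reverse=True)
--         division_winners.append(division_standings[0])
--         wild_cards.extend(division_standings[1:])
--
--     # Determine wild card teams
--     wild_cards = sorted(wild_cards, key=lambda x: standings[x], reverse=True)[:2]
--
--     return division_winners, wild_cards
-- ===== SOURCE B (Python) =====
-- def determine_postseason_teams(divisions, standings):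
--     # One linear scan per division instead of a per-division sort, and a running
--     # top-2 scan over the pool instead of sorting the pool.
--     division_winners = []
--     pool = []
--     for division in divisions:
--         best = division[0]
--         for t in division[1:]:
--             if standings[t] > standings[best]:
--                 best = t
--         division_winners.append(best)
--         rest = list(division)
--         rest.remove(best)
--         pool.extend(rest)
--     t1 = None
--     t2 = None
--     for x in pool:
--         v = standings[x]
--         if t1 is None or v > standings[t1]:
--             t2 = t1
--             t1 = x
--         elif t2 is None or v > standings[t2]:
--             t2 = x
--     wild_cards = [t for t in (t1, t2) if t is not None]
--     return division_winners, wild_cards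
-- ===== Notes on version B (the rewrite author's own statement) =====
-- stated objective: alternative
-- what changed: Replaces the per-division sort with a linear first-max scan (winner kept, winner removed positionally from the wild-card pool) and replaces the final sort-and-slice with a running top-2 scan over the pool, relying on the stability of Python's sort for tie order.
import Mathlib
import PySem

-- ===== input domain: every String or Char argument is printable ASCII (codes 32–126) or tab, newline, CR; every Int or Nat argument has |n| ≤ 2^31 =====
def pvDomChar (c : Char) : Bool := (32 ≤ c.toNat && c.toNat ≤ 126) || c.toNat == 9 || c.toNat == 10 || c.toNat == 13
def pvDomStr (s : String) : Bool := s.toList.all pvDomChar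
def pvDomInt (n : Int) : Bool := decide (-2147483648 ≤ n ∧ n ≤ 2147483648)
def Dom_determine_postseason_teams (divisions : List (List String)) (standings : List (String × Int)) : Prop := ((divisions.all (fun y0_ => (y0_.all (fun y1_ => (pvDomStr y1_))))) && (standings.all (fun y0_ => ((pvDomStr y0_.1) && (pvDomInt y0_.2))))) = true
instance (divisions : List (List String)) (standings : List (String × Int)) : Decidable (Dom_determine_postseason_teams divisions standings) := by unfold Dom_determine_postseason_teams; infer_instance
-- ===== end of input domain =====

-- B replaces A's per-division sorts and final sort-and-slice by linear scans
-- (first-max winner with positional removal, running top-2 for the wild cards);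
-- the equivalence proof rests on the stability of Python's sort.

-- ===== PORT A =====
-- A: per division, stable-sort descending by standings; winner = head, the sorted
-- tail feeds the wild-card pool; finally sort the pool descending and keep two.
def determine_postseason_teams (divisions : List (List String)) (standings : List (String × Int)) : List String × List String :=
  let key : String → Int := fun x => (PySem.Dict.mk standings).getD x 0
  let r := divisions.foldl (fun (acc : List String × List String) division =>
    let ds := PySem.List.sorted division key true
    -- division_standings[0] raises IndexError on an empty division (excluded by Pre_); headD "" there
    (acc.1 ++ [ds.headD ""], acc.2 ++ ds.drop 1)) ([], [])
  (r.1, (PySem.List.sorted r.2 key true).take 2)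

-- ===== PORT B =====
def determine_postseason_teams_alt (divisions : List (List String)) (standings : List (String × Int)) : List String × List String :=
  let key : String → Int := fun x => (PySem.Dict.mk standings).getD x 0
  let wp := divisions.foldl (fun (acc : List String × List String) division =>
    match division with
    -- division[0] raises IndexError on an empty division (excluded by Pre_)
    | [] => (acc.1 ++ [""], acc.2)
    | h :: t =>
      let best := t.foldl (fun b x => if key b < key x then x else b) h
      let rest := (PySem.List.remove? division best).getD []
      (acc.1 ++ [best], acc.2 ++ rest)) ([], [])
  let tops := wp.2.foldl (fun (st : Option String × Option String) x =>
      match st with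
      | (none, _) => (some x, none)
      | (some a, none) => if key a < key x then (some x, some a) else (some a, some x)
      | (some a, some b) =>
          if key a < key x then (some x, some a)
          else if key b < key x then (some a, some x) else (some a, some b)) (none, none)
  (wp.1,
    (match tops.1 with | some a => [a] | none => []) ++
    (match tops.2 with | some b => [b] | none => []))

-- ===== PRECONDITION & SPEC =====
-- Pre_ excludes exactly the inputs on which the Python A raises: an empty division
-- (IndexError on division_standings[0]) or a team absent from standings (KeyError).
def Pre_determine_postseason_teams (divisions : List (List String)) (standings : List (String × Int)) : Prop :=
  ∀ d ∈ divisions, d ≠ [] ∧ ∀ x ∈ d, x ∈ standings.map Prod.fst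
instance (divisions : List (List String)) (standings : List (String × Int)) : Decidable (Pre_determine_postseason_teams divisions standings) := by unfold Pre_determine_postseason_teams; infer_instance

def pvWitness_determine_postseason_teams : List (List String) × (List (String × Int)) :=
  ([["NYY", "BOS"], ["LAD", "SF", "SD"]], [("NYY", 99), ("BOS", 89), ("LAD", 100), ("SF", 90), ("SD", 90)])

def Spec_determine_postseason_teams (divisions : List (List String)) (standings : List (String × Int)) (out : List String × List String) : Prop := out = determine_postseason_teams_alt divisions standings
instance (divisions : List (List String)) (standings : List (String × Int)) (out : List String × List String) : Decidable (Spec_determine_postseason_teams divisions standings out) := by unfold Spec_determine_postseason_teams; infer_instance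

-- ===== CLAIM (what is proved, stated in full; the proofs are below) =====
def Claim_equal_determine_postseason_teams : Prop := ∀ (divisions : List (List String)) (standings : List (String × Int)), Dom_determine_postseason_teams divisions standings → Pre_determine_postseason_teams divisions standings → Spec_determine_postseason_teams divisions standings (determine_postseason_teams divisions standings)

-- ===== LEMMAS AND PROOFS =====

def flt (key : String → Int) (k : Int) (l : List String) : List String :=
  l.filter (fun a => key a == k)

theorem insertBy_eq_take_drop (before : String → String → Bool) (x : String) (ys : List String) :
    PySem.List.insertBy before x ys =
      ys.takeWhile (fun y => !before x y) ++ x :: ys.dropWhile (fun y => !before x y) := by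
  induction ys with
  | nil => rfl
  | cons y ys ih =>
    by_cases h : before x y
    · simp [PySem.List.insertBy, h]
    · simp [PySem.List.insertBy, h, ih]

theorem flt_insertBy (key : String → Int) (x : String) (ys : List String)
    (hys : ys.Pairwise (fun a b => key b ≤ key a)) (k : Int) :
    flt key k (PySem.List.insertBy (fun a b => decide (key b < key a)) x ys) =
      flt key k ys ++ flt key k [x] := by
  rw [insertBy_eq_take_drop]
  by_cases hk : key x = k
  · -- x is kept by the filter; drop part contains no key-k element
    have hdrop : ∀ y ∈ ys.dropWhile (fun y => !(decide (key y < key x))), key y < key x := by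
      intro y hy
      rcases hd : ys.dropWhile (fun y => !(decide (key y < key x))) with _ | ⟨d, ds⟩
      · simp [hd] at hy
      · have hdlt : key d < key x := by
          have := List.head_dropWhile_not (p := fun y => !(decide (key y < key x))) (l := ys)
            (by simp [hd])
          simpa [hd] using this
        have hsub : (d :: ds).Pairwise (fun a b => key b ≤ key a) := by
          have := List.Pairwise.sublist
            (List.dropWhile_sublist (p := fun y => !(decide (key y < key x))) (l := ys)) hys
          simpa [hd] using this
        rw [hd, List.mem_cons] at hy
        rcases hy with rfl | hy
        · exact hdlt
        · have := (List.pairwise_cons.mp hsub).1 y hy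
          omega
    simp only [flt, List.filter_append, List.filter_cons]
    have : (key x == k) = true := by simpa using hk
    simp only [this]
    have hdropf : (ys.dropWhile (fun y => !(decide (key y < key x)))).filter (fun a => key a == k) = [] := by
      rw [List.filter_eq_nil_iff]
      intro y hy
      have := hdrop y hy
      simp only [beq_iff_eq]
      omega
    rw [hdropf]
    have hsplit : ys.filter (fun a => key a == k) =
        (ys.takeWhile (fun y => !(decide (key y < key x)))).filter (fun a => key a == k) := by
      conv_lhs => rw [← List.takeWhile_append_dropWhile (p := fun y => !(decide (key y < key x))) (l := ys)]
      rw [List.filter_append, hdropf, List.append_nil]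
    rw [hsplit]
    simp [flt]
  · -- x is dropped by the filter
    have hx : (key x == k) = false := by simpa using hk
    simp only [flt, List.filter_append, List.filter_cons, hx, Bool.false_eq_true, if_false]
    rw [← List.filter_append, List.takeWhile_append_dropWhile]
    simp

theorem flt_sorted (key : String → Int) (l : List String) (k : Int) :
    flt key k (PySem.List.sorted l key true) = flt key k l := by
  induction l using List.reverseRecOn with
  | nil => rfl
  | append_singleton s x ih =>
    rw [show PySem.List.sorted (s ++ [x]) key true =
        PySem.List.insertBy (fun a b => decide (key b < key a)) x (PySem.List.sorted s key true) by
      rw [PySem.List.sorted_rev_eq_foldl_insertBy, PySem.List.sorted_rev_eq_foldl_insertBy,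
        List.foldl_append]; rfl]
    rw [flt_insertBy key x _ (PySem.List.sorted_pairwise_rev s key) k, ih]
    simp [flt]

theorem eq_of_desc_of_flt (key : String → Int) (l1 l2 : List String)
    (h1 : l1.Pairwise (fun a b => key b ≤ key a)) (h2 : l2.Pairwise (fun a b => key b ≤ key a))
    (hf : ∀ k, flt key k l1 = flt key k l2) : l1 = l2 := by
  induction l1 generalizing l2 with
  | nil =>
    cases l2 with
    | nil => rfl
    | cons b t2 =>
      have := hf (key b)
      simp [flt] at this
  | cons a t1 ih =>
    cases l2 with
    | nil =>
      have := hf (key a)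
      simp [flt] at this
    | cons b t2 =>
      have hab : key a = key b := by
        have hb : b ∈ flt key (key b) (a :: t1) := by
          rw [hf]; simp [flt, List.mem_filter]
        have hbm : b ∈ a :: t1 := List.mem_of_mem_filter hb
        have ha : a ∈ flt key (key a) (b :: t2) := by
          rw [← hf]; simp [flt, List.mem_filter]
        have ham : a ∈ b :: t2 := List.mem_of_mem_filter ha
        rcases List.mem_cons.mp hbm with rfl | hbm'
        · rfl
        · rcases List.mem_cons.mp ham with h | ham'
          · rw [h]
          · have hx := (List.pairwise_cons.mp h1).1 b hbm'
            have hy := (List.pairwise_cons.mp h2).1 a ham'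
            omega
      have hk := hf (key b)
      simp only [flt, List.filter_cons, beq_self_eq_true, if_true,
        show (key a == key b) = true from by simp [hab]] at hk
      obtain ⟨rfl, -⟩ := List.cons.inj hk
      have hft : ∀ k, flt key k t1 = flt key k t2 := by
        intro k
        have hthis := hf k
        simp only [flt, List.filter_cons] at hthis ⊢
        split_ifs at hthis with hc
        · exact (List.cons.inj hthis).2
        · exact hthis
      rw [ih t2 (List.pairwise_cons.mp h1).2 (List.pairwise_cons.mp h2).2 hft]

theorem sorted_congr_flt (key : String → Int) (xs ys : List String)
    (h : ∀ k, flt key k xs = flt key k ys) :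
    PySem.List.sorted xs key true = PySem.List.sorted ys key true := by
  apply eq_of_desc_of_flt key _ _ (PySem.List.sorted_pairwise_rev xs key) (PySem.List.sorted_pairwise_rev ys key)
  intro k
  rw [flt_sorted, flt_sorted]
  exact h k

theorem scan_best_spec (key : String → Int) (h : String) (t : List String) :
    (t.foldl (fun b x => if key b < key x then x else b) h) ∈ h :: t ∧
    (∀ y ∈ h :: t, key y ≤ key (t.foldl (fun b x => if key b < key x then x else b) h)) ∧
    (∀ y ∈ (h :: t).takeWhile (fun y => y ≠ (t.foldl (fun b x => if key b < key x then x else b) h)),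
      key y < key (t.foldl (fun b x => if key b < key x then x else b) h)) := by
  induction t generalizing h with
  | nil => simp
  | cons x xs ih =>
    by_cases hc : key h < key x
    · obtain ⟨m1, m2, m3⟩ := ih x
      simp only [List.foldl_cons, if_pos hc]
      set m := xs.foldl (fun b x => if key b < key x then x else b) x with hm
      have hxm : key x ≤ key m := m2 x (by simp)
      have hhm : key h < key m := lt_of_lt_of_le hc hxm
      refine ⟨by rcases List.mem_cons.mp m1 with h1 | h1 <;> simp [h1], ?_, ?_⟩
      · intro y hy
        rcases List.mem_cons.mp hy with rfl | hy'
        · omega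
        · exact m2 y hy'
      · intro y hy
        have hne : h ≠ m := by intro he; rw [he] at hhm; omega
        rw [List.takeWhile_cons, if_pos (by simp [hne])] at hy
        rcases List.mem_cons.mp hy with rfl | hy'
        · exact hhm
        · exact m3 y hy'
    · obtain ⟨m1, m2, m3⟩ := ih h
      simp only [List.foldl_cons, if_neg hc]
      set m := xs.foldl (fun b x => if key b < key x then x else b) h with hm
      have hhm : key h ≤ key m := m2 h (by simp)
      refine ⟨?_, ?_, ?_⟩
      · rcases List.mem_cons.mp m1 with h1 | h1 <;> simp [h1]
      · intro y hy
        rcases List.mem_cons.mp hy with rfl | hy'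
        · exact hhm
        · rcases List.mem_cons.mp hy' with rfl | hy''
          · omega
          · exact m2 y (by simp [hy''])
      · intro y hy
        by_cases hhe : h = m
        · rw [List.takeWhile_cons, if_neg (by simp [hhe])] at hy
          simp at hy
        · rw [List.takeWhile_cons, if_pos (by simp [hhe])] at hy
          have hth : ∀ z ∈ (h :: xs).takeWhile (fun y => y ≠ m), key z < key m := m3
          have hhlt : key h < key m := by
            have := hth h (by rw [List.takeWhile_cons, if_pos (by simp [hhe])]; simp)
            exact this
          rcases List.mem_cons.mp hy with rfl | hy' 
          · exact hhlt
          · by_cases hxe : x = m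
            · rw [List.takeWhile_cons, if_neg (by simp [hxe])] at hy'
              simp at hy'
            · rw [List.takeWhile_cons, if_pos (by simp [hxe])] at hy'
              rcases List.mem_cons.mp hy' with rfl | hy''
              · omega
              · -- y in takeWhile xs; reuse m3 through the h-cons
                have : y ∈ (h :: xs).takeWhile (fun y => y ≠ m) := by
                  rw [List.takeWhile_cons, if_pos (by simp [hhe])]
                  exact List.mem_cons_of_mem _ hy''
                exact hth y this

theorem division_step (key : String → Int) (h : String) (t : List String) :
    (PySem.List.sorted (h :: t) key true).headD "" =
        (t.foldl (fun b x => if key b < key x then x else b) h) ∧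
    ∀ k, flt key k ((PySem.List.sorted (h :: t) key true).drop 1) =
        flt key k ((PySem.List.remove? (h :: t)
          (t.foldl (fun b x => if key b < key x then x else b) h)).getD []) := by
  obtain ⟨m1, m2, m3⟩ := scan_best_spec key h t
  set m := t.foldl (fun b x => if key b < key x then x else b) h with hm
  set d := h :: t with hd
  -- decompose d at the first occurrence of m
  set pre := d.takeWhile (fun y => y ≠ m) with hpre
  set rest := d.dropWhile (fun y => y ≠ m) with hrest
  have hsplit : pre ++ rest = d := List.takeWhile_append_dropWhile
  have hrest_ne : rest ≠ [] := by
    intro he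
    have : ∀ y ∈ d, (fun y => decide (y ≠ m)) y = true := by
      rw [← hsplit, he, List.append_nil]
      intro y hy
      rw [hpre] at hy
      exact List.mem_takeWhile_imp (p := fun y => decide (y ≠ m)) (l := d) (x := y) hy
    have := this m m1
    simp at this
  obtain ⟨m', suf, hms⟩ := List.exists_cons_of_ne_nil hrest_ne
  have hm' : m' = m := by
    have hh := List.head?_dropWhile_not (fun y => decide (y ≠ m)) d
    rw [← hrest, hms] at hh
    simpa using hh
  subst hm'
  have hdd : d = pre ++ m :: suf := by rw [← hsplit, hms]
  have hpre_lt : ∀ y ∈ pre, key y < key m := by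
    intro y hy
    exact m3 y hy
  have hpre_nm : m ∉ pre := by
    intro hc
    have := hpre_lt m hc
    omega
  -- remove? returns the positional erase
  have hrem : (PySem.List.remove? d m).getD [] = pre ++ suf := by
    rw [PySem.List.remove?_eq_some_erase d m m1]
    rw [hdd, List.erase_append_right _ hpre_nm, List.erase_cons_head]
    rfl
  -- sorted d = m :: sorted (pre ++ suf)
  have hsor : PySem.List.sorted d key true = m :: PySem.List.sorted (pre ++ suf) key true := by
    apply eq_of_desc_of_flt key _ _ (PySem.List.sorted_pairwise_rev d key)
    · rw [List.pairwise_cons]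
      refine ⟨?_, PySem.List.sorted_pairwise_rev _ key⟩
      intro y hy
      have hyd : y ∈ d := by
        have := ((PySem.List.mem_sorted (pre ++ suf) key true) y).mp hy
        rw [hdd]
        rcases List.mem_append.mp this with h1 | h1
        · exact List.mem_append.mpr (Or.inl h1)
        · exact List.mem_append.mpr (Or.inr (List.mem_cons_of_mem _ h1))
      exact m2 y hyd
    · intro k
      have hfs : ∀ (l : List String), List.filter (fun a => key a == k) (PySem.List.sorted l key true)
          = List.filter (fun a => key a == k) l := fun l => flt_sorted key l k
      simp only [flt, List.filter_cons, hfs, hdd, List.filter_append]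
      by_cases hk : key m = k
      · have hfp : List.filter (fun a => key a == k) pre = [] := by
          rw [List.filter_eq_nil_iff]
          intro y hy
          have := hpre_lt y hy
          simp only [beq_iff_eq]
          omega
        rw [show (key m == k) = true from by simp [hk]]
        simp [hfp]
      · rw [show (key m == k) = false from by simp [hk]]
        simp
  constructor
  · rw [hsor]; rfl
  · intro k
    rw [hsor, hrem]
    simp only [List.drop_succ_cons, List.drop_zero]
    rw [flt_sorted]

def stOf : List String → Option String × Option String
  | [] => (none, none)
  | [a] => (some a, none)
  | a :: b :: _ => (some a, some b)

def pvStep (key : String → Int) (st : Option String × Option String) (x : String) :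
    Option String × Option String :=
  match st with
  | (none, _) => (some x, none)
  | (some a, none) => if key a < key x then (some x, some a) else (some a, some x)
  | (some a, some b) =>
      if key a < key x then (some x, some a)
      else if key b < key x then (some a, some x) else (some a, some b)

theorem top2_fold (key : String → Int) (l s : List String) :
    l.foldl (pvStep key) (stOf ((PySem.List.sorted s key true).take 2))
    = stOf ((PySem.List.sorted (s ++ l) key true).take 2) := by
  induction l generalizing s with
  | nil => rw [List.append_nil]; rfl
  | cons x l ih =>
    rw [List.foldl_cons]
    have hsnoc : PySem.List.sorted (s ++ [x]) key true =
        PySem.List.insertBy (fun a b => decide (key b < key a)) x (PySem.List.sorted s key true) := by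
      rw [PySem.List.sorted_rev_eq_foldl_insertBy, PySem.List.sorted_rev_eq_foldl_insertBy,
        List.foldl_append]
      rfl
    have hstep : pvStep key (stOf ((PySem.List.sorted s key true).take 2)) x
      = stOf ((PySem.List.sorted (s ++ [x]) key true).take 2) := by
      rw [hsnoc]
      rcases hs : PySem.List.sorted s key true with _ | ⟨a, rest⟩
      · simp [PySem.List.insertBy, stOf, pvStep]
      · rcases rest with _ | ⟨b, rest⟩
        · by_cases hc : key a < key x
          · simp [PySem.List.insertBy, stOf, pvStep, hc]
          · simp [PySem.List.insertBy, stOf, pvStep, hc]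
        · by_cases hc : key a < key x
          · simp [PySem.List.insertBy, stOf, pvStep, hc]
          · by_cases hc2 : key b < key x
            · simp [PySem.List.insertBy, stOf, pvStep, hc, hc2]
            · simp [PySem.List.insertBy, stOf, pvStep, hc, hc2]
    rw [hstep, ih (s ++ [x]), List.append_assoc]
    rfl

theorem folds_relate (key : String → Int) (divisions : List (List String))
    (acc1 acc2 : List String × List String)
    (h1 : acc1.1 = acc2.1) (h2 : ∀ k, flt key k acc1.2 = flt key k acc2.2) :
    (divisions.foldl (fun (acc : List String × List String) division =>
        let ds := PySem.List.sorted division key true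
        (acc.1 ++ [ds.headD ""], acc.2 ++ ds.drop 1)) acc1).1
      = (divisions.foldl (fun (acc : List String × List String) division =>
        match division with
        | [] => (acc.1 ++ [""], acc.2)
        | h :: t =>
          let best := t.foldl (fun b x => if key b < key x then x else b) h
          let rest := (PySem.List.remove? division best).getD []
          (acc.1 ++ [best], acc.2 ++ rest)) acc2).1 ∧
    ∀ k, flt key k (divisions.foldl (fun (acc : List String × List String) division =>
        let ds := PySem.List.sorted division key true
        (acc.1 ++ [ds.headD ""], acc.2 ++ ds.drop 1)) acc1).2
      = flt key k (divisions.foldl (fun (acc : List String × List String) division =>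
        match division with
        | [] => (acc.1 ++ [""], acc.2)
        | h :: t =>
          let best := t.foldl (fun b x => if key b < key x then x else b) h
          let rest := (PySem.List.remove? division best).getD []
          (acc.1 ++ [best], acc.2 ++ rest)) acc2).2 := by
  induction divisions generalizing acc1 acc2 with
  | nil => exact ⟨h1, h2⟩
  | cons d ds ih =>
    simp only [List.foldl_cons]
    cases d with
    | nil =>
      have hnil : PySem.List.sorted ([] : List String) key true = [] := rfl
      apply ih
      · simp [hnil, h1]
      · intro k
        simp only [hnil, List.drop_nil, List.append_nil]
        exact h2 k
    | cons h t =>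
      obtain ⟨e1, e2⟩ := division_step key h t
      apply ih
      · simp only []
        rw [h1, e1]
      · intro k
        simp only [flt, List.filter_append]
        rw [show List.filter (fun a => key a == k) acc1.2 = List.filter (fun a => key a == k) acc2.2
            from h2 k]
        rw [show List.filter (fun a => key a == k) ((PySem.List.sorted (h :: t) key true).drop 1)
            = List.filter (fun a => key a == k) ((PySem.List.remove? (h :: t)
              (t.foldl (fun b x => if key b < key x then x else b) h)).getD []) from e2 k]

theorem top2_port (key : String → Int) (pool : List String) :
    (match (pool.foldl (fun (st : Option String × Option String) x =>
      match st with
      | (none, _) => (some x, none)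
      | (some a, none) => if key a < key x then (some x, some a) else (some a, some x)
      | (some a, some b) =>
          if key a < key x then (some x, some a)
          else if key b < key x then (some a, some x) else (some a, some b)) (none, none)).1 with
      | some a => [a] | none => ([] : List String)) ++
    (match (pool.foldl (fun (st : Option String × Option String) x =>
      match st with
      | (none, _) => (some x, none)
      | (some a, none) => if key a < key x then (some x, some a) else (some a, some x)
      | (some a, some b) =>
          if key a < key x then (some x, some a)
          else if key b < key x then (some a, some x) else (some a, some b)) (none, none)).2 with
      | some b => [b] | none => ([] : List String))
    = (PySem.List.sorted pool key true).take 2 := by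
  have h : pool.foldl (pvStep key) (none, none)
      = stOf ((PySem.List.sorted pool key true).take 2) := by
    have := top2_fold key pool []
    simpa using this
  show (match (pool.foldl (pvStep key) (none, none)).1 with
      | some a => [a] | none => ([] : List String)) ++
    (match (pool.foldl (pvStep key) (none, none)).2 with
      | some b => [b] | none => ([] : List String))
    = (PySem.List.sorted pool key true).take 2
  rw [h]
  rcases hsp : PySem.List.sorted pool key true with _ | ⟨a, _ | ⟨b, r⟩⟩ <;> simp [stOf]

theorem main_eq (divisions : List (List String)) (standings : List (String × Int)) :
    determine_postseason_teams divisions standings = determine_postseason_teams_alt divisions standings := by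
  unfold determine_postseason_teams determine_postseason_teams_alt
  simp only []
  set key : String → Int := fun x => (PySem.Dict.mk standings).getD x 0 with hkey
  obtain ⟨hw, hp⟩ := folds_relate key divisions ([], []) ([], []) rfl (fun k => rfl)
  rw [top2_port key]
  refine Prod.ext hw ?_
  simp only []
  rw [sorted_congr_flt key _ _ hp]

-- ===== VERDICT (by name: the statement is the Claim_ definition above) =====
theorem determine_postseason_teams_spec : Claim_equal_determine_postseason_teams := by
  intro divisions standings _ _
  unfold Spec_determine_postseason_teams
  exact main_eq divisions standings
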